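-- pv_equiv track=rewrite | github.com/aotabekov91/gizmo | src/gizmo/vimo/view/mixin/hint_back.py | generate
-- ===== SOURCE A (Python) =====
-- def generate(alist):
--
--     alpha = 'abcdefghijklmnopqrstuvwxyz'
--
--     def remap(n, l):
--         c = []
--         for _ in range(l):
--             c.append(alpha[n % len(alpha)])
--             n = n // len(alpha)
--         return "".join(reversed(c))
--
--     hmap={}
--     hints={}
--     l=0
--     al=len(alpha)
--     ll=len(alist)
--     while al**l<ll: l+=1
--     l = max(l, 1)
--     for j, d in enumerate(alist):
--         item=d['item']
--         if not item in hints: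
--             hints[item]={}
--         m=remap(j, l)
--         hmap[m]=d
--         hints[item][m]=d
--     return hints, hmap
-- ===== SOURCE B (Python) =====
-- def generate(alist):
--
--     alpha = 'abcdefghijklmnopqrstuvwxyz'
--
--     # smallest width l >= 1 with 26**l >= len(alist)
--     l = 1
--     while 26 ** l < len(alist):
--         l += 1
--
--     # all length-l hint strings in lexicographic order (last char varies fastest)
--     codes = ['']
--     for _ in range(l):
--         codes = [s + c for s in codes for c in alpha]
--
--     # stage 1: the flat hint map is just the codes zipped with the items
--     hmap = dict(zip(codes, alist))
--
--     # stage 2: group the flat map by item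
--     hints = {}
--     for m, d in hmap.items():
--         hints.setdefault(d['item'], {})[m] = d
--
--     return hints, hmap
-- ===== Notes on version B (the rewrite author's own statement) =====
-- stated objective: alternative
-- what changed: B is two staged passes instead of A's single interleaved loop: it enumerates all length-l hint codes at once by repeated Cartesian extension of the alphabet, builds hmap directly as dict(zip(codes, alist)), and then groups the finished hmap by item in a second pass over hmap.items(), whereas A base-26-remaps each enumerate index and grows both dicts together in one loop.
import Mathlib
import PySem

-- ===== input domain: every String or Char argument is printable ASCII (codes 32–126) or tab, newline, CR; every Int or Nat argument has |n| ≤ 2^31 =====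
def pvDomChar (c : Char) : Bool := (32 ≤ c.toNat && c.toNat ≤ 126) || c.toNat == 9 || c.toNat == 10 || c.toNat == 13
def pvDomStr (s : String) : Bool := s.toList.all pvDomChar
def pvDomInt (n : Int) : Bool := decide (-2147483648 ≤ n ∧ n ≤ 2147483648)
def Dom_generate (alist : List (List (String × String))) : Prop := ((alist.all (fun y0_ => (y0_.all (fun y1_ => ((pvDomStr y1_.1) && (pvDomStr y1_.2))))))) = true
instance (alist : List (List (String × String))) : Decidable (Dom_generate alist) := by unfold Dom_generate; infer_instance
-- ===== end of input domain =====

-- B builds the result in two staged passes — it materialises all length-l hint codes at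
-- once (lexicographic Cartesian extension), forms hmap directly as dict(zip(codes, alist)),
-- and then groups that finished map by item — instead of A's single loop that base-26
-- remaps each index and grows both dicts together (objective: alternative, same cost).

-- shared helper: the alphabet constant and the width loop `while 26**l < ll: l += 1`
-- (fuel ll only makes the while loop total; it stops after at most ll increments)
def alphaChars : List Char := "abcdefghijklmnopqrstuvwxyz".toList

def findLGo : Nat → Nat → Nat → Nat
  | 0, _, l => l
  | Nat.succ f, ll, l => if 26 ^ l < ll then findLGo f ll (l+1) else l

-- ===== PORT A =====
-- A starts its width loop at l = 0 and takes max(l, 1) afterwards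
def findL (ll : Nat) : Nat := findLGo ll ll 0

-- def remap(n, l): c = []; for _ in range(l): c.append(alpha[n % 26]); n = n // 26; return "".join(reversed(c))
def remapLoop : Nat → Int → List Char → List Char
  | 0, _, c => c
  | Nat.succ k, n, c =>
      remapLoop k (PySem.Int.floordiv n 26)
        (c ++ [PySem.List.pyGetD alphaChars (PySem.Int.mod n 26) ' '])

def remapA (n : Int) (l : Nat) : String := String.ofList (remapLoop l n []).reverse

-- body of `for j, d in enumerate(alist)`; `d['item']` raises KeyError when the key is
-- missing — those inputs are outside Pre_generate, the `.getD ""` there is never claimed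
def stepA (l : Nat)
    (st : PySem.Dict String (PySem.Dict String (List (String × String))) × PySem.Dict String (List (String × String)))
    (jd : Int × List (String × String)) :
    PySem.Dict String (PySem.Dict String (List (String × String))) × PySem.Dict String (List (String × String)) :=
  let d := jd.2
  let item := (PySem.Dict.get? (PySem.Dict.mk d) "item").getD ""
  let hints := if PySem.Dict.contains st.1 item then st.1 else PySem.Dict.insert st.1 item PySem.Dict.empty
  let m := remapA jd.1 l
  (PySem.Dict.modify hints item PySem.Dict.empty (fun inner => PySem.Dict.insert inner m d),
   PySem.Dict.insert st.2 m d)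

def generate (alist : List (List (String × String))) :
    (List (String × List (String × List (String × String)))) × (List (String × List (String × String))) :=
  let l := max (findL alist.length) 1
  let st := (PySem.List.enumerate alist 0).foldl (stepA l) (PySem.Dict.empty, PySem.Dict.empty)
  ((PySem.Dict.items st.1).map (fun p => (p.1, PySem.Dict.items p.2)), PySem.Dict.items st.2)

-- ===== PORT B =====
-- one round of `codes = [s + c for s in codes for c in alpha]`
def extendCodes (cs : List (List Char)) : List (List Char) :=
  cs.flatMap (fun s => alphaChars.map (fun c => s ++ [c]))

-- body of `for m, d in hmap.items(): hints.setdefault(d['item'], {})[m] = d`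
-- (setdefault returns the inner dict which is then mutated: exactly Dict.modify on it)
def stepB (h : PySem.Dict String (PySem.Dict String (List (String × String))))
    (md : String × List (String × String)) :
    PySem.Dict String (PySem.Dict String (List (String × String))) :=
  let item := (PySem.Dict.get? (PySem.Dict.mk md.2) "item").getD ""
  PySem.Dict.modify (PySem.Dict.setdefault h item PySem.Dict.empty) item PySem.Dict.empty
    (fun inner => PySem.Dict.insert inner md.1 md.2)

def generate_alt (alist : List (List (String × String))) :
    (List (String × List (String × List (String × String)))) × (List (String × List (String × String))) :=
  let l := findLGo alist.length alist.length 1          -- B's width loop starts at l = 1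
  let codes := (List.range l).foldl (fun cs _ => extendCodes cs) [[]]
  let hmap := PySem.Dict.ofList ((codes.map String.ofList).zip alist)   -- dict(zip(codes, alist))
  let hints := (PySem.Dict.items hmap).foldl stepB PySem.Dict.empty
  ((PySem.Dict.items hints).map (fun p => (p.1, PySem.Dict.items p.2)), PySem.Dict.items hmap)

-- ===== PRECONDITION & SPEC =====
-- Pre_: every element dict must carry the key 'item'; on the others A (and B) raise KeyError.
def Pre_generate (alist : List (List (String × String))) : Prop :=
  ∀ d ∈ alist, "item" ∈ d.map Prod.fst

instance (alist : List (List (String × String))) : Decidable (Pre_generate alist) := by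
  unfold Pre_generate; infer_instance

def pvWitness_generate : (List (List (String × String))) :=
  [[("item", "x")], [("item", "y"), ("k", "v")], [("item", "x")]]

-- hand-assembled DecidableEq for the output type (default instance-search size is exceeded)
def pvDecEqHints : DecidableEq (List (String × List (String × List (String × String)))) :=
  @instDecidableEqList _ (@instDecidableEqProd _ _ _ (@instDecidableEqList _ (@instDecidableEqProd _ _ _ inferInstance)))

def pvDecEqOut : DecidableEq ((List (String × List (String × List (String × String)))) × (List (String × List (String × String)))) :=
  @instDecidableEqProd _ _ pvDecEqHints inferInstance

def Spec_generate (alist : List (List (String × String))) (out : (List (String × List (String × List (String × String)))) × (List (String × List (String × String)))) : Prop := out = generate_alt alist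
instance (alist : List (List (String × String))) (out : (List (String × List (String × List (String × String)))) × (List (String × List (String × String)))) : Decidable (Spec_generate alist out) := by unfold Spec_generate; exact pvDecEqOut _ _

-- ===== CLAIM (what is proved, stated in full; the proofs are below) =====
def Claim_equal_generate : Prop := ∀ (alist : List (List (String × String))), Dom_generate alist → Pre_generate alist → Spec_generate alist (generate alist)

-- ===== LEMMAS AND PROOFS =====

-- the codes loop, unrolled from the top: a proof-side recursion
def combos : Nat → List (List Char)
  | 0 => [[]]
  | Nat.succ k => extendCodes (combos k)

lemma codes_eq (l : Nat) :
    (List.range l).foldl (fun cs _ => extendCodes cs) [[]] = combos l := by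
  induction l with
  | zero => rfl
  | succ l ih => rw [List.range_succ, List.foldl_append, ih]; rfl

-- stopping value: if the fuel covers the remaining distance, the loop reaches 26^l ≥ ll
lemma findLGo_stop {f ll l : Nat} (h : ¬ 26 ^ l < ll) : findLGo f ll l = l := by
  cases f <;> simp [findLGo, h]

lemma findLGo_fuel : ∀ (f f' ll l : Nat), ll ≤ 26 ^ (l + f) → ll ≤ 26 ^ (l + f') →
    findLGo f ll l = findLGo f' ll l := by
  intro f
  induction f with
  | zero =>
      intro f' ll l h _
      simp only [Nat.add_zero] at h
      rw [findLGo, findLGo_stop (by omega)]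
  | succ f ih =>
      intro f' ll l h h'
      by_cases hlt : 26 ^ l < ll
      · cases f' with
        | zero => simp at h'; omega
        | succ f' =>
            simp only [findLGo, if_pos hlt]
            exact ih f' ll (l+1) (by rw [show l+1+f = l+(f+1) by omega]; exact h)
              (by rw [show l+1+f' = l+(f'+1) by omega]; exact h')
      · rw [findLGo_stop hlt, findLGo_stop hlt]

lemma self_le_pow (n k : Nat) (h : n ≤ k) : n ≤ 26 ^ k :=
  le_trans h (le_of_lt (Nat.lt_pow_self (by norm_num)))

-- result never drops below the start value
lemma findLGo_le_start : ∀ (f ll l : Nat), l ≤ findLGo f ll l := by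
  intro f
  induction f with
  | zero => intro ll l; simp [findLGo]
  | succ f ih =>
      intro ll l
      rw [findLGo]
      split
      · exact le_trans (by omega) (ih ll (l+1))
      · omega

-- A's width (max(l,1) over a loop from 0) equals B's width (the loop from 1)
lemma width_eq (ll : Nat) : max (findL ll) 1 = findLGo ll ll 1 := by
  unfold findL
  match ll with
  | 0 => rfl
  | 1 => rfl
  | (n+2) =>
    have h0 : findLGo (n+2) (n+2) 0 = findLGo (n+1) (n+2) 1 := by
      show (if 26 ^ 0 < n+2 then findLGo (n+1) (n+2) (0+1) else 0) = _
      rw [if_pos (by norm_num)]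
    have h1 : findLGo (n+1) (n+2) 1 = findLGo (n+2) (n+2) 1 :=
      findLGo_fuel (n+1) (n+2) (n+2) 1 (self_le_pow _ _ (by omega)) (self_le_pow _ _ (by omega))
    rw [h0, h1]
    exact Nat.max_eq_left (le_trans (by omega) (findLGo_le_start (n+2) (n+2) 1))

lemma le_pow_findLB (ll : Nat) : ll ≤ 26 ^ findLGo ll ll 1 := by
  rcases Nat.lt_or_ge (26 ^ 1) ll with h | h
  · -- loop runs; induct via fuel adequacy: result l satisfies ¬ 26^l < ll at the stop
    suffices H : ∀ f l, ll ≤ 26 ^ (l + f) → ll ≤ 26 ^ findLGo f ll l by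
      exact H ll 1 (self_le_pow _ _ (by omega))
    intro f
    induction f with
    | zero => intro l h; simpa using h
    | succ f ih =>
        intro l h
        rw [findLGo]
        split
        · exact ih (l+1) (by rw [show l+1+f = l+(f+1) by omega]; exact h)
        · omega
  · rw [findLGo_stop (by omega)]; omega

lemma length_alphaChars : alphaChars.length = 26 := rfl

lemma length_combos : ∀ k, (combos k).length = 26 ^ k := by
  intro k
  induction k with
  | zero => simp [combos]
  | succ k ih => simp [combos, extendCodes, List.length_flatMap, ih, pow_succ, length_alphaChars, Nat.mul_comm]

lemma nodup_combos : ∀ k, (combos k).Nodup := by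
  intro k
  induction k with
  | zero => simp [combos]
  | succ k ih =>
      simp only [combos, extendCodes]
      rw [List.nodup_flatMap]
      constructor
      · intro s _
        exact (List.nodup_map_iff_inj_on (by decide)).mpr
          (fun c _ c' _ h => by
            have := (List.append_inj' h rfl).2
            simpa using this)
      · refine List.Pairwise.imp_of_mem ?_ ih
        intro s t _ _ hne x hxs hxt
        simp only [List.mem_map] at hxs hxt
        obtain ⟨c, _, rfl⟩ := hxs
        obtain ⟨c', _, he⟩ := hxt
        exact hne ((List.append_inj' he rfl).1.symm)

lemma remapLoop_acc : ∀ (k : Nat) (n : Int) (c : List Char),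
    remapLoop k n c = c ++ remapLoop k n [] := by
  intro k
  induction k with
  | zero => simp [remapLoop]
  | succ k ih =>
      intro n c
      simp only [remapLoop]
      rw [ih _ (c ++ _), ih _ ([] ++ _)]
      simp

lemma getElem?_extendCodes (cs : List (List Char)) (n : Nat) :
    (extendCodes cs)[n]? =
      cs[n / 26]?.bind (fun s => (alphaChars.map (fun c => s ++ [c]))[n % 26]?) := by
  unfold extendCodes
  induction cs generalizing n with
  | nil => simp
  | cons s t ih =>
      rw [List.flatMap_cons]
      by_cases h : n < 26
      · rw [List.getElem?_append_left (by simp [length_alphaChars]; omega)]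
        rw [Nat.div_eq_of_lt h, Nat.mod_eq_of_lt h]
        simp
      · rw [Nat.not_lt] at h
        rw [List.getElem?_append_right (by simp [length_alphaChars]; omega)]
        simp only [List.length_map, length_alphaChars]
        rw [ih (n - 26)]
        rw [Nat.div_eq_sub_div (by norm_num) h, Nat.mod_eq_sub_mod h]
        simp

lemma combos_getElem? : ∀ (k n : Nat), n < 26 ^ k →
    (combos k)[n]? = some ((remapLoop k (n : Int) []).reverse) := by
  intro k
  induction k with
  | zero =>
      intro n h
      have : n = 0 := by simpa using h
      subst this
      rfl
  | succ k ih =>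
      intro n h
      have hdiv : n / 26 < 26 ^ k := by
        have h26 : n < 26 * 26 ^ k := by rw [← pow_succ']; exact h
        exact Nat.div_lt_of_lt_mul h26
      have hmod : n % 26 < alphaChars.length := by
        rw [length_alphaChars]; exact Nat.mod_lt _ (by norm_num)
      rw [show combos (k+1) = extendCodes (combos k) from rfl,
          getElem?_extendCodes, ih _ hdiv]
      have hfd : PySem.Int.floordiv (n : Int) 26 = ((n / 26 : Nat) : Int) := by
        exact_mod_cast PySem.Int.floordiv_natCast n 26
      have hmd : PySem.Int.mod (n : Int) 26 = ((n % 26 : Nat) : Int) := by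
        exact_mod_cast PySem.Int.mod_natCast n 26
      rw [show remapLoop (k+1) (n : Int) [] =
            remapLoop k (PySem.Int.floordiv (n : Int) 26)
              ([PySem.List.pyGetD alphaChars (PySem.Int.mod (n : Int) 26) ' ']) from rfl,
          hfd, hmd,
          remapLoop_acc k ((n / 26 : Nat) : Int) [PySem.List.pyGetD alphaChars ((n % 26 : Nat) : Int) ' ']]
      simp only [List.getElem?_map, List.getElem?_eq_getElem hmod, Option.map_some,
        Option.bind_some, List.reverse_cons, List.singleton_append, Option.some.injEq]
      rw [PySem.List.pyGetD_natCast, List.getD_eq_getElem _ _ hmod]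

-- the combined one-pass step of A, phrased on a (code, item) pair
def stepC
    (st : PySem.Dict String (PySem.Dict String (List (String × String))) × PySem.Dict String (List (String × String)))
    (md : List Char × List (String × String)) :
    PySem.Dict String (PySem.Dict String (List (String × String))) × PySem.Dict String (List (String × String)) :=
  (stepB st.1 (String.ofList md.1, md.2), PySem.Dict.insert st.2 (String.ofList md.1) md.2)

lemma step_eq (l : Nat) (st) (j : Int) (d : List (String × String)) :
    stepA l st (j, d) = stepC st ((remapLoop l j []).reverse, d) := by
  unfold stepA stepC stepB remapA PySem.Dict.setdefault
  by_cases hc : PySem.Dict.contains st.1 ((PySem.Dict.get? (PySem.Dict.mk d) "item").getD "") = true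
  · simp [hc]
  · simp [hc, PySem.Dict.insert]

lemma fold_eq (l : Nat) : ∀ (ys : List (List (String × String))) (j : Nat) st,
    j + ys.length ≤ 26 ^ l →
    (((combos l).drop j).zip ys).foldl stepC st =
      (PySem.List.enumerate ys (j : Int)).foldl (stepA l) st := by
  intro ys
  induction ys with
  | nil => intro j st h; simp [PySem.List.enumerate]
  | cons y t ih =>
      intro j st h
      simp only [List.length_cons] at h
      have hj : j < (combos l).length := by rw [length_combos]; omega
      have hg : (combos l)[j] = (remapLoop l (j : Int) []).reverse := by
        have h2 := combos_getElem? l j (by omega)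
        rw [List.getElem?_eq_getElem hj] at h2
        exact Option.some.inj h2
      rw [List.drop_eq_getElem_cons hj, List.zip_cons_cons, PySem.List.enumerate_cons]
      simp only [List.foldl_cons]
      rw [hg, ← step_eq l st (j : Int) y]
      have h3 := ih (j+1) (stepA l st ((j : Int), y)) (by omega)
      rw [show ((j : Int) + 1) = ((j + 1 : Nat) : Int) by push_cast; ring, ← h3]

-- the combined fold splits into its two independent components
lemma fold_split : ∀ (ps : List (List Char × List (String × String))) h m,
    ps.foldl stepC (h, m) =
      (ps.foldl (fun h md => stepB h (String.ofList md.1, md.2)) h,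
       ps.foldl (fun dm md => PySem.Dict.insert dm (String.ofList md.1) md.2) m) := by
  intro ps
  induction ps with
  | nil => intro h m; rfl
  | cons p t ih => intro h m; simp only [List.foldl_cons]; exact ih _ _

lemma map_fst_zip_take {α β : Type} : ∀ (l1 : List α) (l2 : List β),
    (l1.zip l2).map Prod.fst = l1.take l2.length := by
  intro l1
  induction l1 with
  | nil => intro l2; simp
  | cons a t ih => intro l2; cases l2 <;> simp [ih]

-- ===== VERDICT (by name: the statement is the Claim_ definition above) =====
theorem generate_spec : Claim_equal_generate := by
  intro alist _ _
  show generate alist = generate_alt alist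
  simp only [generate, generate_alt, codes_eq, ← width_eq alist.length]
  set L := max (findL alist.length) 1 with hL
  have hpow : alist.length ≤ 26 ^ L := by
    rw [hL, width_eq]; exact le_pow_findLB alist.length
  -- A's one-pass fold equals the combined fold over the zipped codes
  have hA := fold_eq L alist 0 (PySem.Dict.empty, PySem.Dict.empty) (by simpa using hpow)
  simp only [List.drop_zero, Nat.cast_zero] at hA
  rw [← hA, fold_split]
  have hzm : (List.map String.ofList (combos L)).zip alist
      = ((combos L).zip alist).map (fun p => (String.ofList p.1, p.2)) := by
    rw [List.zip_map_left]
    exact List.map_congr_left (fun p _ => by cases p; rfl)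
  have hS1 : List.foldl (fun h md => stepB h (String.ofList md.1, md.2)) PySem.Dict.empty
        ((combos L).zip alist)
      = List.foldl stepB PySem.Dict.empty
          (((combos L).zip alist).map (fun p => (String.ofList p.1, p.2))) :=
    List.foldl_map.symm
  have hS2 : List.foldl (fun dm md => PySem.Dict.insert dm (String.ofList md.1) md.2)
        PySem.Dict.empty ((combos L).zip alist)
      = List.foldl (fun acc p => PySem.Dict.insert acc p.1 p.2) PySem.Dict.empty
          (((combos L).zip alist).map (fun p => (String.ofList p.1, p.2))) := by
    rw [List.foldl_map]
  have hnodup : ((((combos L).zip alist).map (fun p => (String.ofList p.1, p.2))).map Prod.fst).Nodup := by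
    have h1 : (((combos L).zip alist).map (fun p => (String.ofList p.1, p.2))).map Prod.fst
        = (((combos L).zip alist).map Prod.fst).map String.ofList := by
      simp [List.map_map, Function.comp_def]
    rw [h1, map_fst_zip_take]
    exact (((nodup_combos L).sublist (List.take_sublist _ _)).map
      (fun a b hab => String.ofList_inj.mp hab))
  have hfresh : (List.foldl (fun acc p => PySem.Dict.insert acc p.1 p.2) PySem.Dict.empty
        (((combos L).zip alist).map (fun p => (String.ofList p.1, p.2)))).items
      = ((combos L).zip alist).map (fun p => (String.ofList p.1, p.2)) := by
    have := PySem.Dict.items_foldl_insert_fresh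
      (((combos L).zip alist).map (fun p => (String.ofList p.1, p.2))) Prod.fst Prod.snd
      PySem.Dict.empty (by intro a _; rfl) hnodup
    simpa using this
  simp only [PySem.Dict.ofList, PySem.Dict.update, hzm]
  rw [hS1, hS2, hfresh]
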